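-- pv_equiv track=rewrite | github.com/vitalfocheux/Advent-Of-Code | 2015/14/14.py | simulate_race_with_points
-- ===== SOURCE A (Python) =====
-- def simulate_race_with_points(reindeers, race_time):
--     distances = {name: 0 for name in reindeers}
--     points = {name: 0 for name in reindeers}
--     for _ in range(race_time):
--         for name, (speed, fly_time, rest_time) in reindeers.items():
--             if _ % (fly_time + rest_time) < fly_time:
--                 distances[name] += speed
--         leading_distance = max(distances.values())
--         for name in reindeers:
--             if distances[name] == leading_distance:
--                 points[name] += 1
--     return points
-- ===== SOURCE B (Python) =====
-- def simulate_race_with_points(reindeers, race_time):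
--     # Precompute each reindeer's position at every second, then score seconds.
--     names = []
--     tracks = []
--     for name, (speed, fly_time, rest_time) in reindeers.items():
--         pos = 0
--         track = []
--         for t in range(race_time):
--             if t % (fly_time + rest_time) < fly_time:
--                 pos += speed
--             track.append(pos)
--         names.append(name)
--         tracks.append(track)
--     points = {name: 0 for name in names}
--     for t in range(race_time):
--         lead = max(track[t] for track in tracks)
--         for name, track in zip(names, tracks):
--             if track[t] == lead:
--                 points[name] += 1
--     return points
-- ===== Notes on version B (the rewrite author's own statement) =====
-- stated objective: alternative
-- what changed: B transposes the loops: it precomputes each reindeer's full position track in one pass per reindeer, then scores the seconds against the track matrix, eliminating A's running distances dict that is interleaved into the per-second scoring; Pre_ excludes duplicate reindeer names (the association list then does not represent a Python dict) and exactly the inputs where A raises (race_time >= 1 with an empty dict, ValueError from max, or some fly_time + rest_time = 0, ZeroDivisionError from %).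
import Mathlib
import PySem

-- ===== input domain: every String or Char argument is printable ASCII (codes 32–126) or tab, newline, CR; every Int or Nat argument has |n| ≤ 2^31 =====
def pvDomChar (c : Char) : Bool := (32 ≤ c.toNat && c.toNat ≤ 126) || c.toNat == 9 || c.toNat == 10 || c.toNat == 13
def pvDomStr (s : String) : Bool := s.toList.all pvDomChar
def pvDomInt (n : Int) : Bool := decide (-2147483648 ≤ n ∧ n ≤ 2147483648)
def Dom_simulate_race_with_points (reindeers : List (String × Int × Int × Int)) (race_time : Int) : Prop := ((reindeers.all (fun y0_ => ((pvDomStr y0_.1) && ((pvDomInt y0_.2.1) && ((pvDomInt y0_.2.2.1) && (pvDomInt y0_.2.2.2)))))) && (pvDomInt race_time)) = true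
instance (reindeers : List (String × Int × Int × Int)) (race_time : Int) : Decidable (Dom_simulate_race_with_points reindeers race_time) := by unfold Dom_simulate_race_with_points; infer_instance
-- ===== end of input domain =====

-- B transposes the loops: it precomputes each reindeer's full position track, then scores the
-- seconds against the track matrix, eliminating A's running distances dict (alternative decomposition, same cost).


-- ===== PORT A =====
-- '{name: 0 for name in reindeers}'
def pvInit0 (reindeers : List (String × Int × Int × Int)) : PySem.Dict String Int :=
  reindeers.foldl (fun d r => d.insert r.1 0) (PySem.Dict.mk [])

-- body of A's outer 'for _ in range(race_time)' loop (state = (distances, points))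
def pvStepA (reindeers : List (String × Int × Int × Int))
    (st : PySem.Dict String Int × PySem.Dict String Int) (s : Int) :
    PySem.Dict String Int × PySem.Dict String Int :=
  let distances := reindeers.foldl (fun d r =>
      if PySem.Int.mod s (r.2.2.1 + r.2.2.2) < r.2.2.1 then d.modify r.1 0 (· + r.2.1) else d) st.1
  match PySem.List.max? distances.values (fun x => x) with
  | none => (distances, st.2)  -- Python 'max' raises ValueError here; excluded by Pre_
  | some leading =>
      (distances, reindeers.foldl (fun p r =>
        if distances.getD r.1 0 == leading then p.modify r.1 0 (· + 1) else p) st.2)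

def simulate_race_with_points (reindeers : List (String × Int × Int × Int)) (race_time : Int) : List (String × Int) :=
  let distances := pvInit0 reindeers
  let points := pvInit0 reindeers
  (((PySem.List.pyRange 0 race_time 1).foldl (pvStepA reindeers) (distances, points)).2).items

-- ===== PORT B =====
-- Source B's inner per-reindeer loop: the reindeer's position after each of the first race_time seconds
def pvTrack (speed fly_time rest_time race_time : Int) : List Int :=
  ((PySem.List.pyRange 0 race_time 1).foldl (fun (st : Int × List Int) t =>
      let pos := if PySem.Int.mod t (fly_time + rest_time) < fly_time then st.1 + speed else st.1
      (pos, st.2 ++ [pos])) ((0 : Int), ([] : List Int))).2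

-- body of B's scoring loop 'for t in range(race_time)' (state = points)
def pvStepB (pairs : List (String × List Int)) (pts : PySem.Dict String Int) (t : Int) :
    PySem.Dict String Int :=
  match PySem.List.max? (pairs.map (fun q => (PySem.List.pyGet? q.2 t).getD 0)) (fun x => x) with
  | none => pts  -- Python 'max' raises ValueError here; excluded by Pre_
  | some lead =>
      pairs.foldl (fun p q =>
        if (PySem.List.pyGet? q.2 t).getD 0 == lead then p.modify q.1 0 (· + 1) else p) pts

def simulate_race_with_points_alt (reindeers : List (String × Int × Int × Int)) (race_time : Int) : List (String × Int) :=
  let pairs := reindeers.map (fun r => (r.1, pvTrack r.2.1 r.2.2.1 r.2.2.2 race_time))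
  let points := (pairs.map (·.1)).foldl (fun d n => d.insert n 0) (PySem.Dict.mk [])
  ((PySem.List.pyRange 0 race_time 1).foldl (pvStepB pairs) points).items

-- ===== PRECONDITION & SPEC =====
-- Pre_ excludes (a) duplicate reindeer names, on which the association list does not represent a
-- Python dict, and (b) exactly the inputs where A raises: race_time ≥ 1 with an empty dict
-- (ValueError from max()) or with some fly_time + rest_time = 0 (ZeroDivisionError from '%').
def Pre_simulate_race_with_points (reindeers : List (String × Int × Int × Int)) (race_time : Int) : Prop :=
  (reindeers.map (·.1)).Nodup ∧
  (race_time ≤ 0 ∨ (reindeers ≠ [] ∧ ∀ r ∈ reindeers, r.2.2.1 + r.2.2.2 ≠ 0))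
instance (reindeers : List (String × Int × Int × Int)) (race_time : Int) : Decidable (Pre_simulate_race_with_points reindeers race_time) := by unfold Pre_simulate_race_with_points; infer_instance

def pvWitness_simulate_race_with_points : (List (String × Int × Int × Int)) × Int :=
  ([("Comet", 14, 10, 127), ("Dancer", 16, 11, 162)], 20)

def Spec_simulate_race_with_points (reindeers : List (String × Int × Int × Int)) (race_time : Int) (out : List (String × Int)) : Prop := out = simulate_race_with_points_alt reindeers race_time
instance (reindeers : List (String × Int × Int × Int)) (race_time : Int) (out : List (String × Int)) : Decidable (Spec_simulate_race_with_points reindeers race_time out) := by unfold Spec_simulate_race_with_points; infer_instance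

-- ===== CLAIM (what is proved, stated in full; the proofs are below) =====
def Claim_equal_simulate_race_with_points : Prop := ∀ (reindeers : List (String × Int × Int × Int)) (race_time : Int), Dom_simulate_race_with_points reindeers race_time → Pre_simulate_race_with_points reindeers race_time → Spec_simulate_race_with_points reindeers race_time (simulate_race_with_points reindeers race_time)

-- ===== LEMMAS AND PROOFS =====

-- seconds spent flying during the first k seconds (A's per-second accumulation, counted)
def pvCnt (fly rest : Int) : Nat → Int
  | 0 => 0
  | (k+1) => pvCnt fly rest k + (if PySem.Int.mod (k : Int) (fly + rest) < fly then 1 else 0)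

-- the distances row after k seconds
def pvRow (reindeers : List (String × Int × Int × Int)) (k : Nat) : List (String × Int) :=
  reindeers.map (fun r => (r.1, r.2.1 * pvCnt r.2.2.1 r.2.2.2 k))

-- B's pairs list
def pvPairs (reindeers : List (String × Int × Int × Int)) (race_time : Int) : List (String × List Int) :=
  reindeers.map (fun r => (r.1, pvTrack r.2.1 r.2.2.1 r.2.2.2 race_time))

-- ---------- pvTrack characterisation ----------
lemma pvTrack_foldl (speed fly rest : Int) : ∀ n : Nat,
    (PySem.List.pyRange 0 (n : Int) 1).foldl (fun (st : Int × List Int) t =>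
        let pos := if PySem.Int.mod t (fly + rest) < fly then st.1 + speed else st.1
        (pos, st.2 ++ [pos])) ((0 : Int), ([] : List Int))
      = (speed * pvCnt fly rest n, (List.range n).map (fun k => speed * pvCnt fly rest (k + 1))) := by
  intro n
  induction n with
  | zero => rw [PySem.List.pyRange_one_eq_nil (by simp)]; simp [pvCnt]
  | succ n ih =>
      have h : PySem.List.pyRange 0 ((n + 1 : Nat) : Int) 1
          = PySem.List.pyRange 0 (n : Int) 1 ++ [(n : Int)] := by
        push_cast
        exact PySem.List.pyRange_one_succ_right (by positivity)
      rw [h, List.foldl_append, ih]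
      simp only [List.foldl_cons, List.foldl_nil, List.range_succ, List.map_append, List.map_cons,
        List.map_nil]
      have hc : pvCnt fly rest (n + 1)
          = pvCnt fly rest n + (if PySem.Int.mod (n : Int) (fly + rest) < fly then 1 else 0) := rfl
      rw [Prod.mk.injEq]
      constructor <;> · simp only [hc]; split_ifs <;> simp [mul_add]

lemma pvTrack_eq (speed fly rest : Int) (n : Nat) :
    pvTrack speed fly rest (n : Int)
      = (List.range n).map (fun k => speed * pvCnt fly rest (k + 1)) := by
  unfold pvTrack
  rw [pvTrack_foldl]

lemma pvTrack_get (speed fly rest : Int) (n k : Nat) (hk : k < n) :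
    (PySem.List.pyGet? (pvTrack speed fly rest (n : Int)) (k : Int)).getD 0
      = speed * pvCnt fly rest (k + 1) := by
  rw [pvTrack_eq, PySem.List.pyGet?_natCast]
  simp [hk]

-- ---------- association-list / Dict lemmas ----------
lemma pv_find?_mid (pre suf : List (String × Int)) (k : String) (v : Int)
    (h : ∀ p ∈ pre, p.1 ≠ k) :
    List.find? (fun p => p.1 == k) (pre ++ (k, v) :: suf) = some (k, v) := by
  induction pre with
  | nil => simp
  | cons a l ih =>
      have ha : (a.1 == k) = false := beq_eq_false_iff_ne.mpr (h a (List.mem_cons_self))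
      simpa [ha] using ih (fun p hp => h p (List.mem_cons_of_mem _ hp))

lemma pv_map_id_of_ne (l : List (String × Int)) (k : String) (w : Int)
    (h : ∀ p ∈ l, p.1 ≠ k) :
    l.map (fun p => if p.1 == k then (k, w) else p) = l := by
  induction l with
  | nil => rfl
  | cons a l ih =>
      have ha : a.1 ≠ k := h a List.mem_cons_self
      simp only [List.map_cons]
      rw [if_neg (by simp [ha]), ih (fun p hp => h p (List.mem_cons_of_mem _ hp))]

lemma pv_insert_mid (pre suf : List (String × Int)) (k : String) (v w : Int)
    (h1 : ∀ p ∈ pre, p.1 ≠ k) (h2 : ∀ p ∈ suf, p.1 ≠ k) :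
    PySem.Dict.insert (PySem.Dict.mk (pre ++ (k, v) :: suf)) k w
      = PySem.Dict.mk (pre ++ (k, w) :: suf) := by
  have hc : (PySem.Dict.mk (pre ++ (k, v) :: suf)).contains k = true := by
    simp [PySem.Dict.contains]
  rw [PySem.Dict.insert, if_pos hc]
  simp only [List.map_append, List.map_cons, beq_self_eq_true, if_pos]
  rw [pv_map_id_of_ne pre k w h1, pv_map_id_of_ne suf k w h2]

lemma pv_getD_mid (pre suf : List (String × Int)) (k : String) (v d : Int)
    (h : ∀ p ∈ pre, p.1 ≠ k) :
    (PySem.Dict.mk (pre ++ (k, v) :: suf)).getD k d = v := by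
  simp [PySem.Dict.getD, PySem.Dict.get?, pv_find?_mid pre suf k v h]

lemma pv_modify_mid (pre suf : List (String × Int)) (k : String) (v : Int) (f : Int → Int)
    (h1 : ∀ p ∈ pre, p.1 ≠ k) (h2 : ∀ p ∈ suf, p.1 ≠ k) :
    PySem.Dict.modify (PySem.Dict.mk (pre ++ (k, v) :: suf)) k 0 f
      = PySem.Dict.mk (pre ++ (k, f v) :: suf) := by
  rw [PySem.Dict.modify, pv_getD_mid pre suf k v 0 h1, pv_insert_mid pre suf k v (f v) h1 h2]

lemma pv_foldl_insert (rs : List (String × Int × Int × Int)) (f : (String × Int × Int × Int) → Int) :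
    ∀ acc : List (String × Int), (∀ r ∈ rs, ∀ p ∈ acc, p.1 ≠ r.1) → (rs.map (·.1)).Nodup →
    rs.foldl (fun d r => d.insert r.1 (f r)) (PySem.Dict.mk acc)
      = PySem.Dict.mk (acc ++ rs.map (fun r => (r.1, f r))) := by
  induction rs with
  | nil => intro acc _ _; simp
  | cons r rest ih =>
      intro acc hfresh hnod
      rw [List.map_cons] at hnod
      obtain ⟨hnotin, hnod'⟩ := List.nodup_cons.mp hnod
      have hc : (PySem.Dict.mk acc).contains r.1 = false := by
        simp only [PySem.Dict.contains, List.any_eq_false]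
        intro p hp
        simpa using hfresh r List.mem_cons_self p hp
      have hi : PySem.Dict.insert (PySem.Dict.mk acc) r.1 (f r)
          = PySem.Dict.mk (acc ++ [(r.1, f r)]) := by
        rw [PySem.Dict.insert, hc]; simp
      simp only [List.foldl_cons, hi]
      rw [ih (acc ++ [(r.1, f r)]) ?_ hnod']
      · simp
      · intro r' hr' p hp
        rcases List.mem_append.mp hp with hpl | hpr
        · exact hfresh r' (List.mem_cons_of_mem _ hr') p hpl
        · have : p = (r.1, f r) := by simpa using hpr
          subst this
          intro hcontra
          exact hnotin (by rw [hcontra]; exact List.mem_map_of_mem hr')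

lemma pv_foldl_modify (cond : (String × Int × Int × Int) → Prop) [DecidablePred cond]
    (val : (String × Int × Int × Int) → Int) :
    ∀ (rs : List (String × Int × Int × Int)) (pre : List (String × Int)),
    (∀ r ∈ rs, ∀ p ∈ pre, p.1 ≠ r.1) → (rs.map (·.1)).Nodup →
    rs.foldl (fun d r => if cond r then PySem.Dict.modify d r.1 0 (· + r.2.1) else d)
        (PySem.Dict.mk (pre ++ rs.map (fun r => (r.1, val r))))
      = PySem.Dict.mk (pre ++ rs.map (fun r => (r.1, val r + if cond r then r.2.1 else 0))) := by
  intro rs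
  induction rs with
  | nil => intro pre _ _; simp
  | cons r rest ih =>
      intro pre hfresh hnod
      rw [List.map_cons] at hnod
      obtain ⟨hnotin, hnod'⟩ := List.nodup_cons.mp hnod
      have hsuf : ∀ p ∈ rest.map (fun r => (r.1, val r)), p.1 ≠ r.1 := by
        intro p hp
        obtain ⟨r', hr', rfl⟩ := List.mem_map.mp hp
        intro hcontra
        exact hnotin (by rw [← hcontra]; exact List.mem_map_of_mem hr')
      have hpre : ∀ p ∈ pre, p.1 ≠ r.1 := fun p hp => hfresh r List.mem_cons_self p hp
      have hstep : ∀ w : Int,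
          PySem.Dict.mk (pre ++ (r.1, w) :: rest.map (fun r => (r.1, val r)))
            = PySem.Dict.mk ((pre ++ [(r.1, w)]) ++ rest.map (fun r => (r.1, val r))) := by
        intro w; simp
      have hfresh' : ∀ w : Int, ∀ r' ∈ rest, ∀ p ∈ pre ++ [(r.1, w)], p.1 ≠ r'.1 := by
        intro w r' hr' p hp
        rcases List.mem_append.mp hp with hpl | hpr
        · exact hfresh r' (List.mem_cons_of_mem _ hr') p hpl
        · have : p = (r.1, w) := by simpa using hpr
          subst this
          intro hcontra
          exact hnotin (by rw [hcontra]; exact List.mem_map_of_mem hr')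
      by_cases hc : cond r
      · simp only [List.map_cons, List.foldl_cons, if_pos hc]
        rw [pv_modify_mid pre (rest.map (fun r => (r.1, val r))) r.1 (val r) (· + r.2.1) hpre hsuf]
        rw [hstep, ih (pre ++ [(r.1, val r + r.2.1)]) (hfresh' _) hnod']
        simp
      · simp only [List.map_cons, List.foldl_cons, if_neg hc]
        rw [hstep, ih (pre ++ [(r.1, val r)]) (hfresh' _) hnod']
        simp

-- getD on the dict built from a keyed map, at a member's key
lemma pv_getD_map (v : (String × Int × Int × Int) → Int) :
    ∀ (rs : List (String × Int × Int × Int)) (r : String × Int × Int × Int),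
    (rs.map (·.1)).Nodup → r ∈ rs →
    (PySem.Dict.mk (rs.map (fun r' => (r'.1, v r')))).getD r.1 0 = v r := by
  intro rs
  induction rs with
  | nil => intro r _ hr; cases hr
  | cons a l ih =>
      intro r hnod hr
      rw [List.map_cons] at hnod
      obtain ⟨hnotin, hnod'⟩ := List.nodup_cons.mp hnod
      by_cases he : a.1 = r.1
      · have hra : r = a := by
          rcases List.mem_cons.mp hr with h | h
          · exact h
          · exact absurd (he ▸ List.mem_map_of_mem h : a.1 ∈ l.map (·.1)) hnotin
        subst hra
        simp [PySem.Dict.getD, PySem.Dict.get?_mk_cons]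
      · have hrl : r ∈ l := by
          rcases List.mem_cons.mp hr with h | h
          · exact absurd (congrArg (·.1) h).symm he
          · exact h
        have := ih r hnod' hrl
        simpa [PySem.Dict.getD, PySem.Dict.get?_mk_cons, he] using this

-- B's per-second observation list equals the row of A's distances
lemma pv_obs (rs : List (String × Int × Int × Int)) (rt : Int) (n : Nat) (hn : (n : Int) < rt) :
    (pvPairs rs rt).map (fun q => (PySem.List.pyGet? q.2 (n : Int)).getD 0)
      = rs.map (fun r => r.2.1 * pvCnt r.2.2.1 r.2.2.2 (n + 1)) := by
  unfold pvPairs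
  rw [List.map_map]
  apply List.map_congr_left
  intro r _
  have hrt : rt = ((rt.toNat : Nat) : Int) := by omega
  have hk : n < rt.toNat := by omega
  show (PySem.List.pyGet? (pvTrack r.2.1 r.2.2.1 r.2.2.2 rt) (n : Int)).getD 0
      = r.2.1 * pvCnt r.2.2.1 r.2.2.2 (n + 1)
  rw [hrt]
  exact pvTrack_get r.2.1 r.2.2.1 r.2.2.2 rt.toNat n hk

-- ---------- main invariant ----------
lemma pv_race (rs : List (String × Int × Int × Int)) (hn : (rs.map (·.1)).Nodup) (rt : Int) :
    ∀ (n : Nat), (n : Int) ≤ rt → ∀ (pts : PySem.Dict String Int),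
    (PySem.List.pyRange 0 (n : Int) 1).foldl (pvStepA rs) (PySem.Dict.mk (pvRow rs 0), pts)
      = (PySem.Dict.mk (pvRow rs n),
         (PySem.List.pyRange 0 (n : Int) 1).foldl (pvStepB (pvPairs rs rt)) pts) := by
  intro n
  induction n with
  | zero => intro _ pts; rw [PySem.List.pyRange_one_eq_nil (by simp)]; simp
  | succ n ih =>
      intro hle pts
      have hA : PySem.List.pyRange 0 ((n + 1 : Nat) : Int) 1
          = PySem.List.pyRange 0 (n : Int) 1 ++ [(n : Int)] := by
        push_cast
        exact PySem.List.pyRange_one_succ_right (by positivity)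
      rw [hA, List.foldl_append, List.foldl_append, ih (by push_cast at hle ⊢; omega)]
      simp only [List.foldl_cons, List.foldl_nil]
      -- the distances update of A's step
      have hdistA : rs.foldl (fun d r =>
          if PySem.Int.mod (n : Int) (r.2.2.1 + r.2.2.2) < r.2.2.1 then d.modify r.1 0 (· + r.2.1) else d)
          (PySem.Dict.mk (pvRow rs n)) = PySem.Dict.mk (pvRow rs (n + 1)) := by
        have := pv_foldl_modify (cond := fun r => PySem.Int.mod (n : Int) (r.2.2.1 + r.2.2.2) < r.2.2.1)
          (val := fun r => r.2.1 * pvCnt r.2.2.1 r.2.2.2 n) rs [] (by simp) hn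
        simp only [List.nil_append] at this
        rw [show pvRow rs n = rs.map (fun r => (r.1, r.2.1 * pvCnt r.2.2.1 r.2.2.2 n)) from rfl, this]
        unfold pvRow
        congr 1
        apply List.map_congr_left
        intro r _
        simp only [pvCnt, mul_add, mul_ite, mul_one, mul_zero]
      have hobs := pv_obs rs rt n (by push_cast at hle ⊢; omega)
      have hvals : (PySem.Dict.mk (pvRow rs (n + 1))).values
          = (pvPairs rs rt).map (fun q => (PySem.List.pyGet? q.2 (n : Int)).getD 0) := by
        rw [hobs]
        simp [PySem.Dict.values, pvRow, List.map_map]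
      show pvStepA rs (PySem.Dict.mk (pvRow rs n), _) (n : Int) = _
      rw [pvStepA, pvStepB]
      simp only [hdistA, ← hvals]
      rcases hmax : PySem.List.max? (PySem.Dict.mk (pvRow rs (n + 1))).values (fun x => x)
        with - | lead
      · simp
      · simp only
        rw [Prod.mk.injEq]
        refine ⟨rfl, ?_⟩
        -- the two award folds agree pointwise over rs
        unfold pvPairs
        rw [List.foldl_map]
        apply PySem.List.foldl_congr_mem
        intro acc r hr
        have h1 : (PySem.Dict.mk (pvRow rs (n + 1))).getD r.1 0
            = r.2.1 * pvCnt r.2.2.1 r.2.2.2 (n + 1) :=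
          pv_getD_map (fun r => r.2.1 * pvCnt r.2.2.1 r.2.2.2 (n + 1)) rs r hn hr
        have h2 : (PySem.List.pyGet? (pvTrack r.2.1 r.2.2.1 r.2.2.2 rt) (n : Int)).getD 0
            = r.2.1 * pvCnt r.2.2.1 r.2.2.2 (n + 1) := by
          have hrt : rt = ((rt.toNat : Nat) : Int) := by omega
          have hk : n < rt.toNat := by push_cast at hle; omega
          rw [hrt]
          exact pvTrack_get r.2.1 r.2.2.1 r.2.2.2 rt.toNat n hk
        rw [h1, h2]

lemma pv_main : ∀ (reindeers : List (String × Int × Int × Int)) (race_time : Int),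
    Pre_simulate_race_with_points reindeers race_time →
    simulate_race_with_points reindeers race_time = simulate_race_with_points_alt reindeers race_time := by
  intro rs rt hpre
  obtain ⟨hn, -⟩ := hpre
  have hInit : pvInit0 rs = PySem.Dict.mk (pvRow rs 0) := by
    unfold pvInit0
    have := pv_foldl_insert rs (fun _ => (0:Int)) [] (by simp) hn
    simp only [List.nil_append] at this
    rw [this]
    unfold pvRow
    congr 1
    apply List.map_congr_left
    intro r _
    simp [pvCnt]
  have hInitB : ((pvPairs rs rt).map (·.1)).foldl (fun d n => d.insert n 0) (PySem.Dict.mk [])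
      = PySem.Dict.mk (pvRow rs 0) := by
    unfold pvPairs
    rw [List.map_map, List.foldl_map, ← hInit]
    rfl
  by_cases hrt : rt ≤ 0
  · unfold simulate_race_with_points simulate_race_with_points_alt
    rw [PySem.List.pyRange_one_eq_nil hrt]
    simp only [List.foldl_nil]
    rw [show (rs.map (fun r => (r.1, pvTrack r.2.1 r.2.2.1 r.2.2.2 rt))) = pvPairs rs rt from rfl,
      hInitB, hInit]
  · have hmain := pv_race rs hn rt rt.toNat (by omega) (PySem.Dict.mk (pvRow rs 0))
    rw [Int.toNat_of_nonneg (by omega : (0:Int) ≤ rt)] at hmain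
    unfold simulate_race_with_points simulate_race_with_points_alt
    rw [hInit]
    show (List.foldl (pvStepA rs) (PySem.Dict.mk (pvRow rs 0), PySem.Dict.mk (pvRow rs 0))
        (PySem.List.pyRange 0 rt 1)).2.items
      = (List.foldl (pvStepB (pvPairs rs rt))
          (((pvPairs rs rt).map (·.1)).foldl (fun d n => d.insert n 0) (PySem.Dict.mk []))
          (PySem.List.pyRange 0 rt 1)).items
    rw [hInitB, hmain]

-- ===== VERDICT (by name: the statement is the Claim_ definition above) =====
theorem simulate_race_with_points_spec : Claim_equal_simulate_race_with_points := by
  intro rs rt _ hpre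
  unfold Spec_simulate_race_with_points
  exact pv_main rs rt hpre
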